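-- pv_equiv track=rewrite | github.com/LinJiang18/EFDiff | Extreme/Extreme_Util.py | hits_with_tol_unique
-- ===== SOURCE A (Python) =====
-- def hits_with_tol_unique(pred_bins, true_bins, delta):
--     """Unique matching with tolerance; returns number of hits."""
--     used = [False] * len(pred_bins)
--     hits = 0
--     for t in sorted(true_bins):
--         best = -1
--         bestd = delta + 1
--         for j, p in enumerate(sorted(pred_bins)):
--             if used[j]:
--                 continue
--             d = abs(p - t)
--             if d <= delta and d < bestd:
--                 bestd = d
--                 best = j
--                 if d == 0:
--                     break
--         if best >= 0:
--             used[best] = True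
--             hits += 1
--     return hits
-- ===== SOURCE B (Python) =====
-- def _bisect_left(a, x):
--     lo, hi = 0, len(a)
--     while lo < hi:
--         mid = (lo + hi) // 2
--         if a[mid] < x:
--             lo = mid + 1
--         else:
--             hi = mid
--     return lo
--
--
-- def hits_with_tol_unique(pred_bins, true_bins, delta):
--     """Unique matching with tolerance; sort preds once, binary-search the
--     nearest still-available pred for each true bin."""
--     avail = sorted(pred_bins)
--     hits = 0
--     for t in sorted(true_bins):
--         i = _bisect_left(avail, t)
--         best = -1
--         if i < len(avail) and avail[i] - t <= delta:
--             best = i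
--         if i > 0 and t - avail[i - 1] <= delta and (best < 0 or t - avail[i - 1] <= avail[i] - t):
--             best = i - 1
--         if best >= 0:
--             avail.pop(best)
--             hits += 1
--     return hits
-- ===== Notes on version B (the rewrite author's own statement) =====
-- stated objective: faster
-- what changed: B sorts the predictions once and, for each true bin, binary-searches the sorted list of still-available predictions and picks the nearer of the two neighbouring candidates, instead of A's re-sorting the predictions and linearly scanning all of them against a used-mask for every true bin.
import Mathlib
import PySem

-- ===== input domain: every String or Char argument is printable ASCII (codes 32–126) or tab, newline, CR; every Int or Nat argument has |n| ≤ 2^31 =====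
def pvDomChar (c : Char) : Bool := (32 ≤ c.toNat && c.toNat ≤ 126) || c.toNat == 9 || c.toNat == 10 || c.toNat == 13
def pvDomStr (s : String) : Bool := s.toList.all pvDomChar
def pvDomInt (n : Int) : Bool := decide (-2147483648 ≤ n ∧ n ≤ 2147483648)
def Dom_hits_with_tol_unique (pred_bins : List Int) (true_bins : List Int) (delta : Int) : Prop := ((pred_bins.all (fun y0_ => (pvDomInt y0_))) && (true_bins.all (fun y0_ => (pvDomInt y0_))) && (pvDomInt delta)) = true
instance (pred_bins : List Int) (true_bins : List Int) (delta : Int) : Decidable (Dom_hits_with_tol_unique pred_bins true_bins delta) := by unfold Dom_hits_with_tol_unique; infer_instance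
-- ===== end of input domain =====

-- B replaces A's per-true-bin re-sort and full linear scan over all preds by one up-front
-- sort of the preds plus a hand-written binary search for the nearest still-available pred.

-- ===== PORT A =====
-- inner loop: for j, p in enumerate(sorted(pred_bins)): … (break on exact hit returns j)
def aInner (t delta : Int) (used : List Bool) : List Int → Nat → Int → Int → Int
  | [], _, best, _ => best
  | p :: ps, j, best, bestd =>
    if used.getD j false then aInner t delta used ps (j+1) best bestd
    else
      if |p - t| ≤ delta ∧ |p - t| < bestd then
        (if |p - t| = 0 then (j : Int) else aInner t delta used ps (j+1) (j : Int) (|p - t|))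
      else aInner t delta used ps (j+1) best bestd

-- outer loop: for t in sorted(true_bins): …
def aOuter (pred_bins : List Int) (delta : Int) : List Int → List Bool → Int → Int
  | [], _, hits => hits
  | t :: ts, used, hits =>
    let best := aInner t delta used (PySem.List.sorted pred_bins (fun x => x)) 0 (-1) (delta + 1)
    if best ≥ 0 then aOuter pred_bins delta ts (used.set best.toNat true) (hits + 1)
    else aOuter pred_bins delta ts used hits

def hits_with_tol_unique (pred_bins : List Int) (true_bins : List Int) (delta : Int) : Int :=
  aOuter pred_bins delta (PySem.List.sorted true_bins (fun x => x))
    (List.replicate pred_bins.length false) 0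

-- ===== PORT B =====
-- hand-written bisect_left (Source B's while loop, as recursion on hi - lo)
def bisectLeft (a : List Int) (x : Int) (lo hi : Nat) : Nat :=
  if _h : lo < hi then
    if a.getD ((lo + hi) / 2) 0 < x then bisectLeft a x ((lo + hi) / 2 + 1) hi
    else bisectLeft a x lo ((lo + hi) / 2)
  else lo
termination_by hi - lo
decreasing_by all_goals omega

-- for t in sorted(true_bins): binary-search avail, pick nearer of the two neighbours
def bOuter (delta : Int) : List Int → List Int → Int → Int
  | [], _, hits => hits
  | t :: ts, avail, hits =>
    let i := bisectLeft avail t 0 avail.length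
    let best1 : Int := if i < avail.length ∧ avail.getD i 0 - t ≤ delta then (i : Int) else -1
    let best2 : Int :=
      if 0 < i ∧ t - avail.getD (i-1) 0 ≤ delta ∧
          (best1 < 0 ∨ t - avail.getD (i-1) 0 ≤ avail.getD i 0 - t) then (i : Int) - 1
      else best1
    if best2 ≥ 0 then bOuter delta ts (avail.eraseIdx best2.toNat) (hits + 1)
    else bOuter delta ts avail hits

def hits_with_tol_unique_alt (pred_bins : List Int) (true_bins : List Int) (delta : Int) : Int :=
  bOuter delta (PySem.List.sorted true_bins (fun x => x))
    (PySem.List.sorted pred_bins (fun x => x)) 0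

-- ===== PRECONDITION & SPEC =====
def Spec_hits_with_tol_unique (pred_bins : List Int) (true_bins : List Int) (delta : Int) (out : Int) : Prop := out = hits_with_tol_unique_alt pred_bins true_bins delta
instance (pred_bins : List Int) (true_bins : List Int) (delta : Int) (out : Int) : Decidable (Spec_hits_with_tol_unique pred_bins true_bins delta out) := by unfold Spec_hits_with_tol_unique; infer_instance

-- ===== CLAIM (what is proved, stated in full; the proofs are below) =====
def Claim_equal_hits_with_tol_unique : Prop := ∀ (pred_bins : List Int) (true_bins : List Int) (delta : Int), Dom_hits_with_tol_unique pred_bins true_bins delta → Spec_hits_with_tol_unique pred_bins true_bins delta (hits_with_tol_unique pred_bins true_bins delta)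

-- ===== LEMMAS AND PROOFS =====

-- ---- proof-side helpers ----

-- enumerate(l) starting at index j
def enumFrom (j : Nat) : List Int → List (Nat × Int)
  | [] => []
  | p :: ps => (j, p) :: enumFrom (j+1) ps

-- A's inner scan over an already-filtered (index, value) list
def midScanP (t delta : Int) : List (Nat × Int) → Int → Int → Int
  | [], best, _ => best
  | (j, p) :: rest, best, bestd =>
    if |p - t| ≤ delta ∧ |p - t| < bestd then
      (if |p - t| = 0 then (j : Int) else midScanP t delta rest (j : Int) (|p - t|))
    else midScanP t delta rest best bestd

-- B's per-true-bin pick, as a named term (definitionally what bOuter computes)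
def bPick (t delta : Int) (v : List Int) : Int :=
  let i := bisectLeft v t 0 v.length
  let best1 : Int := if i < v.length ∧ v.getD i 0 - t ≤ delta then (i : Int) else -1
  if 0 < i ∧ t - v.getD (i-1) 0 ≤ delta ∧
      (best1 < 0 ∨ t - v.getD (i-1) 0 ≤ v.getD i 0 - t) then (i : Int) - 1
  else best1

theorem bOuter_cons (delta t : Int) (ts v : List Int) (hits : Int) :
    bOuter delta (t :: ts) v hits =
      if bPick t delta v ≥ 0 then bOuter delta ts (v.eraseIdx (bPick t delta v).toNat) (hits + 1)
      else bOuter delta ts v hits := rfl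

-- ---- enumFrom facts ----

theorem length_enumFrom (j : Nat) (l : List Int) : (enumFrom j l).length = l.length := by
  induction l generalizing j with
  | nil => rfl
  | cons p ps ih => simp [enumFrom, ih]

theorem map_snd_enumFrom (j : Nat) (l : List Int) : (enumFrom j l).map Prod.snd = l := by
  induction l generalizing j with
  | nil => rfl
  | cons p ps ih => simp [enumFrom, ih]

theorem fst_mem_enumFrom_ge (j : Nat) (l : List Int) (x : Nat × Int) (hx : x ∈ enumFrom j l) :
    j ≤ x.1 := by
  induction l generalizing j with
  | nil => simp [enumFrom] at hx
  | cons p ps ih =>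
    simp only [enumFrom, List.mem_cons] at hx
    rcases hx with h | h
    · subst h; exact le_refl _
    · exact Nat.le_of_succ_le (ih (j+1) h)

theorem fst_mem_enumFrom_lt (j : Nat) (l : List Int) (x : Nat × Int) (hx : x ∈ enumFrom j l) :
    x.1 < j + l.length := by
  induction l generalizing j with
  | nil => simp [enumFrom] at hx
  | cons p ps ih =>
    simp only [enumFrom, List.mem_cons] at hx
    rcases hx with h | h
    · subst h; simp
    · have := ih (j+1) h
      simp only [List.length_cons]
      omega

theorem pairwise_fst_enumFrom (j : Nat) (l : List Int) :
    (enumFrom j l).Pairwise (fun a b => a.1 < b.1) := by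
  induction l generalizing j with
  | nil => exact List.Pairwise.nil
  | cons p ps ih =>
    refine List.Pairwise.cons ?_ (ih (j+1))
    intro y hy
    have := fst_mem_enumFrom_ge (j+1) ps y hy
    omega

-- ---- fusion: A's inner loop = midScanP over the filtered enumerate ----

theorem aInner_eq_midScanP (t delta : Int) (used : List Bool) (ps : List Int) :
    ∀ (j : Nat) (best bd : Int),
      aInner t delta used ps j best bd
        = midScanP t delta ((enumFrom j ps).filter (fun x => !(used.getD x.1 false))) best bd := by
  induction ps with
  | nil => intro j best bd; rfl
  | cons p ps ih =>
    intro j best bd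
    simp only [aInner, enumFrom, List.filter_cons]
    by_cases hu : used.getD j false = true
    · simp only [hu, Bool.not_true, Bool.false_eq_true, if_true, if_false]
      exact ih (j+1) best bd
    · have hu' : used.getD j false = false := by
        cases h : used.getD j false
        · rfl
        · exact absurd h hu
      simp only [hu', Bool.not_false, Bool.false_eq_true, if_false, if_true, midScanP]
      split_ifs with h1 h2
      · rfl
      · exact ih (j+1) (j : Int) (|p - t|)
      · exact ih (j+1) best bd

-- ---- midScanP characterisation ----

theorem midScanP_stay (t delta : Int) :
    ∀ (av : List (Nat × Int)) (best bd : Int),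
      (∀ l (hl : l < av.length), bd ≤ |(av[l]'hl).2 - t|) →
      midScanP t delta av best bd = best := by
  intro av
  induction av with
  | nil => intro best bd _; rfl
  | cons x rest ih =>
    obtain ⟨xj, xp⟩ := x
    intro best bd h
    have h0 : bd ≤ |xp - t| := by simpa using h 0 (by simp)
    have hc : ¬ (|xp - t| ≤ delta ∧ |xp - t| < bd) := by
      rintro ⟨_, hlt⟩; omega
    simp only [midScanP, if_neg hc]
    exact ih best bd (fun l hl => by simpa using h (l+1) (by simpa using Nat.succ_lt_succ hl))

theorem midScanP_first_min (t delta : Int) :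
    ∀ (av : List (Nat × Int)) (best bd : Int) (k : Nat) (hk : k < av.length),
      bd ≤ delta + 1 →
      |(av[k]'hk).2 - t| < bd →
      (∀ l (hl : l < av.length), |(av[k]'hk).2 - t| ≤ |(av[l]'hl).2 - t|) →
      (∀ l (hl : l < k), |(av[k]'hk).2 - t| < |(av[l]'(lt_trans hl hk)).2 - t|) →
      midScanP t delta av best bd = ((av[k]'hk).1 : Int) := by
  intro av
  induction av with
  | nil => intro best bd k hk; exact absurd hk (by simp)
  | cons x rest ih =>
    obtain ⟨xj, xp⟩ := x
    intro best bd k hk hbd hlt hmin hstrict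
    cases k with
    | zero =>
      have hd : |xp - t| < bd := by simpa using hlt
      have hc : |xp - t| ≤ delta ∧ |xp - t| < bd := ⟨by omega, hd⟩
      simp only [midScanP, if_pos hc]
      by_cases h0 : |xp - t| = 0
      · simp [h0]
      · rw [if_neg h0]
        have : midScanP t delta rest (xj : Int) (|xp - t|) = (xj : Int) := by
          apply midScanP_stay
          intro l hl
          have := hmin (l+1) (by simpa using Nat.succ_lt_succ hl)
          simpa using this
        simpa using this
    | succ k' =>
      have hk' : k' < rest.length := by simpa using hk
      have hgetk : (((xj, xp) :: rest)[k'+1]'hk) = rest[k']'hk' := by simp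
      have hstr0 : |(rest[k']'hk').2 - t| < |xp - t| := by
        have := hstrict 0 (Nat.succ_pos k')
        simpa [hgetk] using this
      by_cases hc : |xp - t| ≤ delta ∧ |xp - t| < bd
      · have h0 : ¬ |xp - t| = 0 := by
          have : (0:Int) ≤ |(rest[k']'hk').2 - t| := abs_nonneg _
          omega
        simp only [midScanP, if_pos hc, if_neg h0]
        have := ih (xj : Int) (|xp - t|) k' hk' (by omega) hstr0
          (fun l hl => by
            have := hmin (l+1) (by simpa using Nat.succ_lt_succ hl)
            simpa [hgetk] using this)
          (fun l hl => by
            have := hstrict (l+1) (Nat.succ_lt_succ hl)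
            simpa [hgetk] using this)
        rw [this, ← hgetk]
      · simp only [midScanP, if_neg hc]
        have := ih best bd k' hk' hbd (by simpa [hgetk] using hlt)
          (fun l hl => by
            have := hmin (l+1) (by simpa using Nat.succ_lt_succ hl)
            simpa [hgetk] using this)
          (fun l hl => by
            have := hstrict (l+1) (Nat.succ_lt_succ hl)
            simpa [hgetk] using this)
        rw [this, ← hgetk]

theorem exists_first_min (t : Int) :
    ∀ (av : List (Nat × Int)), av ≠ [] →
      ∃ k, ∃ hk : k < av.length,
        (∀ l (hl : l < av.length), |(av[k]'hk).2 - t| ≤ |(av[l]'hl).2 - t|) ∧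
        (∀ l (hl : l < k), |(av[k]'hk).2 - t| < |(av[l]'(lt_trans hl hk)).2 - t|) := by
  intro av
  induction av with
  | nil => intro h; exact absurd rfl h
  | cons x rest ih =>
    intro _
    by_cases hr : rest = []
    · subst hr
      refine ⟨0, by simp, ?_, ?_⟩
      · intro l hl
        have hl0 : l = 0 := by simpa using Nat.lt_one_iff.mp (by simpa using hl)
        subst hl0; exact le_refl _
      · intro l hl; exact absurd hl (Nat.not_lt_zero l)
    · obtain ⟨k', hk', hmin, hstrict⟩ := ih hr
      by_cases hx : |x.2 - t| ≤ |(rest[k']'hk').2 - t|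
      · refine ⟨0, by simp, ?_, ?_⟩
        · intro l hl
          cases l with
          | zero => exact le_refl _
          | succ l' =>
            have hl' : l' < rest.length := by simpa using hl
            calc |((x :: rest)[0]).2 - t| = |x.2 - t| := by simp
              _ ≤ |(rest[k']'hk').2 - t| := hx
              _ ≤ |(rest[l']'hl').2 - t| := hmin l' hl'
              _ = |((x :: rest)[l'+1]'hl).2 - t| := by simp
        · intro l hl; exact absurd hl (Nat.not_lt_zero l)
      · have hxlt : |(rest[k']'hk').2 - t| < |x.2 - t| := lt_of_not_ge hx
        refine ⟨k'+1, by simpa using Nat.succ_lt_succ hk', ?_, ?_⟩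
        · intro l hl
          cases l with
          | zero => simpa using le_of_lt hxlt
          | succ l' =>
            have hl' : l' < rest.length := by simpa using hl
            have := hmin l' hl'
            simpa using this
        · intro l hl
          cases l with
          | zero => simpa using hxlt
          | succ l' =>
            have hl' : l' < k' := by omega
            have := hstrict l' hl'
            simpa using this

-- ---- bisect spec ----

theorem pairwise_getElem_mono (v : List Int) (h : v.Pairwise (· ≤ ·)) (p q : Nat)
    (hpq : p ≤ q) (hq : q < v.length) : v[p]'(lt_of_le_of_lt hpq hq) ≤ v[q]'hq := by
  rcases Nat.lt_or_ge p q with hlt | hge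
  · exact (List.pairwise_iff_getElem.mp h) p q _ hq hlt
  · have : p = q := le_antisymm hpq hge
    subst this; exact le_refl _

theorem bisectLeft_spec (a : List Int) (x : Int) (hs : a.Pairwise (· ≤ ·)) :
    ∀ (n lo hi : Nat), hi - lo = n → lo ≤ hi → hi ≤ a.length →
      (∀ l (h : l < a.length), l < lo → a[l] < x) →
      (∀ l (h : l < a.length), hi ≤ l → x ≤ a[l]) →
      lo ≤ bisectLeft a x lo hi ∧ bisectLeft a x lo hi ≤ hi ∧
      (∀ l (h : l < a.length), l < bisectLeft a x lo hi → a[l] < x) ∧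
      (∀ l (h : l < a.length), bisectLeft a x lo hi ≤ l → x ≤ a[l]) := by
  intro n
  induction n using Nat.strong_induction_on with
  | _ n IH =>
    intro lo hi hn hlohi hhi hlow hhigh
    rw [bisectLeft]
    by_cases h : lo < hi
    · rw [dif_pos h]
      have hmlt : (lo + hi) / 2 < a.length := by omega
      have hgd : a.getD ((lo + hi) / 2) 0 = a[(lo + hi) / 2]'hmlt := by
        simp [List.getD_eq_getElem?_getD, List.getElem?_eq_getElem hmlt]
      by_cases hc : a.getD ((lo + hi) / 2) 0 < x
      · rw [if_pos hc]
        have hlow' : ∀ l (hp : l < a.length), l < (lo + hi) / 2 + 1 → a[l] < x := by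
          intro l hp hl
          have h1 : a[l] ≤ a[(lo + hi) / 2]'hmlt := pairwise_getElem_mono a hs l _ (by omega) hmlt
          rw [hgd] at hc
          exact lt_of_le_of_lt h1 hc
        obtain ⟨h1, h2, h3, h4⟩ := IH (hi - ((lo + hi) / 2 + 1)) (by omega)
          ((lo + hi) / 2 + 1) hi rfl (by omega) hhi hlow' hhigh
        exact ⟨by omega, h2, h3, h4⟩
      · rw [if_neg hc]
        have hhigh' : ∀ l (hp : l < a.length), (lo + hi) / 2 ≤ l → x ≤ a[l] := by
          intro l hp hl
          have h1 : a[(lo + hi) / 2]'hmlt ≤ a[l] := pairwise_getElem_mono a hs _ l hl hp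
          rw [hgd] at hc
          exact le_trans (le_of_not_gt hc) h1
        obtain ⟨h1, h2, h3, h4⟩ := IH ((lo + hi) / 2 - lo) (by omega)
          lo ((lo + hi) / 2) rfl (by omega) (by omega) hlow hhigh'
        exact ⟨h1, by omega, h3, h4⟩
    · rw [dif_neg h]
      have hle : lo = hi := by omega
      exact ⟨le_refl _, by omega, fun l hp hl => hlow l hp hl,
        fun l hp hl => hhigh l hp (by omega)⟩

-- ---- misc list lemmas ----

theorem map_eraseIdx' (f : (Nat × Int) → Int) :
    ∀ (l : List (Nat × Int)) (k : Nat), (l.eraseIdx k).map f = (l.map f).eraseIdx k := by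
  intro l
  induction l with
  | nil => intro k; rfl
  | cons y ys ih =>
    intro k
    cases k with
    | zero => rfl
    | succ k' => simp [List.eraseIdx, ih]

theorem eraseIdx_eq_of_const (v : List Int) (hsort : v.Pairwise (· ≤ ·)) (a b : Nat)
    (hab : a ≤ b) (hb : b < v.length) (heq : v[a]'(lt_of_le_of_lt hab hb) = v[b]'hb) :
    v.eraseIdx a = v.eraseIdx b := by
  have ha : a < v.length := lt_of_le_of_lt hab hb
  apply List.ext_getElem
  · simp [List.length_eraseIdx, ha, hb]
  · intro m hm1 hm2
    have hmlen : m < v.length - 1 := by simpa [List.length_eraseIdx, ha] using hm1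
    rw [List.getElem_eraseIdx, List.getElem_eraseIdx]
    split_ifs with h1 h2 h3
    · rfl
    · -- m < a and b ≤ m : impossible
      omega
    · -- a ≤ m < b : v[m+1] = v[m], all values in [a,b] equal
      have e1 : v[a]'ha ≤ v[m]'(by omega) := pairwise_getElem_mono v hsort a m (by omega) (by omega)
      have e2 : v[m]'(by omega) ≤ v[m+1]'(by omega) := pairwise_getElem_mono v hsort m (m+1) (by omega) (by omega)
      have e3 : v[m+1]'(by omega) ≤ v[b]'hb := pairwise_getElem_mono v hsort (m+1) b (by omega) hb
      omega
    · rfl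

theorem filter_ne_eq_eraseIdx :
    ∀ (AV : List (Nat × Int)) (k : Nat) (hk : k < AV.length),
      AV.Pairwise (fun a b => a.1 < b.1) →
      AV.filter (fun x => decide (x.1 ≠ (AV[k]'hk).1)) = AV.eraseIdx k := by
  intro AV
  induction AV with
  | nil => intro k hk; exact absurd hk (by simp)
  | cons y ys ih =>
    intro k hk hp
    have hhead := List.pairwise_cons.mp hp
    cases k with
    | zero =>
      simp only [List.getElem_cons_zero, List.eraseIdx_cons_zero, List.filter_cons]
      rw [if_neg (by simp)]
      apply List.filter_eq_self.mpr
      intro z hz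
      have := hhead.1 z hz
      simp; omega
    | succ k' =>
      have hk' : k' < ys.length := by simpa using hk
      have hget : ((y :: ys)[k'+1]'hk) = ys[k']'hk' := by simp
      simp only [hget, List.eraseIdx_cons_succ, List.filter_cons]
      rw [if_pos (by
        have := hhead.1 (ys[k']'hk') (List.getElem_mem hk')
        simp; omega)]
      rw [ih k' hk' hhead.2]

theorem getD_set_true (used : List Bool) (j i : Nat) (hj : j < used.length) :
    (used.set j true).getD i false = if i = j then true else used.getD i false := by
  by_cases h : i = j
  · subst h; simp [List.getD_eq_getElem?_getD, hj]
  · simp [List.getD_eq_getElem?_getD, Ne.symm h, h]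

-- mask update = extra filter on the index
theorem mask_step (sp : List Int) (used : List Bool) (j : Nat) (hj : j < used.length) :
    (enumFrom 0 sp).filter (fun x => !((used.set j true).getD x.1 false))
      = ((enumFrom 0 sp).filter (fun x => !(used.getD x.1 false))).filter
          (fun x => decide (x.1 ≠ j)) := by
  rw [List.filter_filter]
  apply List.filter_congr
  intro x _
  rw [getD_set_true used j x.1 hj]
  by_cases h : x.1 = j <;> simp [h]

-- ---- the per-step correspondence ----

theorem step_core (t delta : Int) (AV : List (Nat × Int))
    (hsort : (AV.map Prod.snd).Pairwise (· ≤ ·)) :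
    (midScanP t delta AV (-1) (delta+1) ≥ 0 ↔ bPick t delta (AV.map Prod.snd) ≥ 0) ∧
    (midScanP t delta AV (-1) (delta+1) ≥ 0 →
      ∃ k, ∃ hk : k < AV.length,
        midScanP t delta AV (-1) (delta+1) = ((AV[k]'hk).1 : Int) ∧
        (AV.map Prod.snd).eraseIdx (bPick t delta (AV.map Prod.snd)).toNat
          = (AV.map Prod.snd).eraseIdx k) := by
  set v := AV.map Prod.snd with hv
  have hlen : AV.length = v.length := by simp [hv]
  have hAVv : ∀ l (hl : l < AV.length), (AV[l]'hl).2 = v[l]'(by omega) := by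
    intro l hl
    simp [hv]
  obtain ⟨hi0, hiN, hlow, hhigh⟩ := bisectLeft_spec v t hsort v.length 0 v.length rfl
    (Nat.zero_le _) le_rfl (fun l h hl => absurd hl (Nat.not_lt_zero l))
    (fun l h hl => absurd h (by omega))
  set i := bisectLeft v t 0 v.length with hi
  have hbp : bPick t delta v =
      (if 0 < i ∧ t - v.getD (i-1) 0 ≤ delta ∧
          ((if i < v.length ∧ v.getD i 0 - t ≤ delta then (i : Int) else -1) < 0 ∨
            t - v.getD (i-1) 0 ≤ v.getD i 0 - t) then (i : Int) - 1
        else (if i < v.length ∧ v.getD i 0 - t ≤ delta then (i : Int) else -1)) := rfl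
  have hgdi : ∀ (h : i < v.length), v.getD i 0 = v[i]'h := by
    intro h
    simp [List.getD_eq_getElem?_getD, List.getElem?_eq_getElem h]
  have hgdi1 : ∀ (h : i - 1 < v.length), v.getD (i-1) 0 = v[i-1]'h := by
    intro h
    simp [List.getD_eq_getElem?_getD, List.getElem?_eq_getElem h]
  by_cases hex : ∃ l, ∃ hl : l < v.length, |v[l]'hl - t| ≤ delta
  · -- some pred within tolerance: both sides pick, erased lists agree
    obtain ⟨l0, hl0, hl0d⟩ := hex
    have hne : AV ≠ [] := by
      intro hnil
      rw [hnil] at hlen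
      simp at hlen
      omega
    obtain ⟨k, hk, hmin, hstrict⟩ := exists_first_min t AV hne
    have hkv : k < v.length := by omega
    have hminv : ∀ l (hl : l < v.length), |v[k]'hkv - t| ≤ |v[l]'hl - t| := by
      intro l hl
      have := hmin l (by omega)
      rwa [hAVv k hk, hAVv l (by omega)] at this
    have hstrictv : ∀ l (hl : l < k), |v[k]'hkv - t| < |v[l]'(by omega) - t| := by
      intro l hl
      have := hstrict l hl
      rwa [hAVv k hk, hAVv l (by omega)] at this
    have hdk : |v[k]'hkv - t| ≤ delta := le_trans (hminv l0 hl0) hl0d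
    have hrA : midScanP t delta AV (-1) (delta+1) = ((AV[k]'hk).1 : Int) := by
      apply midScanP_first_min t delta AV (-1) (delta+1) k hk le_rfl
      · rw [hAVv k hk]; omega
      · exact hmin
      · exact hstrict
    have hrge : midScanP t delta AV (-1) (delta+1) ≥ 0 := by
      rw [hrA]; exact Int.natCast_nonneg _
    -- establish the B-side pick and the erase equality
    by_cases hki : k < i
    · -- left neighbour i-1 is picked, with the same value as v[k]
      have hipos : 0 < i := by omega
      have hi1 : i - 1 < v.length := by omega
      have hvklt : v[k]'hkv < t := hlow k hkv hki
      have hvi1lt : v[i-1]'hi1 < t := hlow (i-1) hi1 (by omega)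
      have hmn : v[k]'hkv ≤ v[i-1]'hi1 := pairwise_getElem_mono v hsort k (i-1) (by omega) hi1
      have habs1 : |v[k]'hkv - t| = t - v[k]'hkv := by rw [abs_of_nonpos (by omega)]; ring
      have habs2 : |v[i-1]'hi1 - t| = t - v[i-1]'hi1 := by rw [abs_of_nonpos (by omega)]; ring
      have hle2 : |v[k]'hkv - t| ≤ |v[i-1]'hi1 - t| := hminv (i-1) hi1
      have hveq : v[k]'hkv = v[i-1]'hi1 := by omega
      have hdl : t - v[i-1]'hi1 ≤ delta := by omega
      have hcond : 0 < i ∧ t - v.getD (i-1) 0 ≤ delta ∧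
          ((if i < v.length ∧ v.getD i 0 - t ≤ delta then (i : Int) else -1) < 0 ∨
            t - v.getD (i-1) 0 ≤ v.getD i 0 - t) := by
        refine ⟨hipos, by rw [hgdi1 hi1]; exact hdl, ?_⟩
        by_cases hr : i < v.length ∧ v.getD i 0 - t ≤ delta
        · right
          rcases hr with ⟨hiv, _⟩
          have hvit : t ≤ v[i]'hiv := hhigh i hiv le_rfl
          have habsr : |v[i]'hiv - t| = v[i]'hiv - t := abs_of_nonneg (by omega)
          have := hminv i hiv
          rw [hgdi1 hi1, hgdi hiv]
          omega
        · left
          rw [if_neg hr]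
          omega
      have hbpv : bPick t delta v = (i : Int) - 1 := by rw [hbp, if_pos hcond]
      have htn : ((i : Int) - 1).toNat = i - 1 := by omega
      refine ⟨⟨fun _ => by rw [hbpv]; omega, fun _ => hrge⟩, fun _ => ⟨k, hk, hrA, ?_⟩⟩
      rw [hbpv, htn]
      exact (eraseIdx_eq_of_const v hsort k (i-1) (by omega) hi1 hveq).symm
    · -- right neighbour i is picked, with the same value as v[k]
      have hik : i ≤ k := by omega
      have hiv : i < v.length := by omega
      have hvit : t ≤ v[i]'hiv := hhigh i hiv le_rfl
      have hvkt : t ≤ v[k]'hkv := hhigh k hkv hik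
      have habsk : |v[k]'hkv - t| = v[k]'hkv - t := abs_of_nonneg (by omega)
      have habsi : |v[i]'hiv - t| = v[i]'hiv - t := abs_of_nonneg (by omega)
      have hmn : v[i]'hiv ≤ v[k]'hkv := pairwise_getElem_mono v hsort i k hik hkv
      have hle2 : |v[k]'hkv - t| ≤ |v[i]'hiv - t| := hminv i hiv
      have hveq : v[i]'hiv = v[k]'hkv := by omega
      have hdr : v.getD i 0 - t ≤ delta := by rw [hgdi hiv]; omega
      have hb1 : (if i < v.length ∧ v.getD i 0 - t ≤ delta then (i : Int) else -1) = (i : Int) :=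
        if_pos ⟨hiv, hdr⟩
      have hcond : ¬ (0 < i ∧ t - v.getD (i-1) 0 ≤ delta ∧
          ((if i < v.length ∧ v.getD i 0 - t ≤ delta then (i : Int) else -1) < 0 ∨
            t - v.getD (i-1) 0 ≤ v.getD i 0 - t)) := by
        rintro ⟨hipos, hdle, hor⟩
        rw [hb1] at hor
        rcases hor with hor | hor
        · omega
        · have hi1 : i - 1 < v.length := by omega
          have hstr := hstrictv (i-1) (by omega)
          have hvi1lt : v[i-1]'hi1 < t := hlow (i-1) hi1 (by omega)
          have habs2 : |v[i-1]'hi1 - t| = t - v[i-1]'hi1 := by rw [abs_of_nonpos (by omega)]; ring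
          rw [hgdi1 hi1, hgdi hiv] at hor
          omega
      have hbpv : bPick t delta v = (i : Int) := by rw [hbp, if_neg hcond, hb1]
      have htn : ((i : Int)).toNat = i := by omega
      refine ⟨⟨fun _ => by rw [hbpv]; omega, fun _ => hrge⟩, fun _ => ⟨k, hk, hrA, ?_⟩⟩
      rw [hbpv, htn]
      exact (eraseIdx_eq_of_const v hsort i k hik hkv hveq)
  · -- nothing within tolerance: A finds no best, B's two candidates both fail
    rw [not_exists] at hex
    replace hex : ∀ l (hl : l < v.length), ¬ |v[l]'hl - t| ≤ delta := fun l hl => by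
      have := hex l
      rw [not_exists] at this
      exact this hl
    have hrA : midScanP t delta AV (-1) (delta+1) = -1 := by
      apply midScanP_stay
      intro l hl
      have := hex l (by omega)
      rw [hAVv l hl]
      omega
    have hb1 : (if i < v.length ∧ v.getD i 0 - t ≤ delta then (i : Int) else -1) = -1 := by
      rw [if_neg]
      rintro ⟨hiv, hd⟩
      have hvit : t ≤ v[i]'hiv := hhigh i hiv le_rfl
      have := hex i hiv
      rw [hgdi hiv] at hd
      have habs : |v[i]'hiv - t| = v[i]'hiv - t := abs_of_nonneg (by omega)
      omega
    have hbpv : bPick t delta v = -1 := by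
      rw [hbp, hb1, if_neg]
      rintro ⟨hipos, hd, _⟩
      have hi1 : i - 1 < v.length := by omega
      have hvi1lt : v[i-1]'hi1 < t := hlow (i-1) hi1 (by omega)
      have := hex (i-1) hi1
      rw [hgdi1 hi1] at hd
      have habs : |v[i-1]'hi1 - t| = t - v[i-1]'hi1 := by rw [abs_of_nonpos (by omega)]; ring
      omega
    constructor
    · rw [hrA, hbpv]
    · intro h
      rw [hrA] at h
      omega

-- ---- the main loop invariant ----

theorem main_loop (pred_bins : List Int) (delta : Int) :
    ∀ (ts : List Int) (used : List Bool) (hits : Int),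
      used.length = (PySem.List.sorted pred_bins (fun x => x)).length →
      aOuter pred_bins delta ts used hits
        = bOuter delta ts
            (((enumFrom 0 (PySem.List.sorted pred_bins (fun x => x))).filter
                (fun x => !(used.getD x.1 false))).map Prod.snd) hits := by
  intro ts
  induction ts with
  | nil => intro used hits hlen; rfl
  | cons t ts ih =>
    intro used hits hlen
    set sp := PySem.List.sorted pred_bins (fun x => x) with hsp
    set AV := (enumFrom 0 sp).filter (fun x => !(used.getD x.1 false)) with hAV
    have hsub : AV.Sublist (enumFrom 0 sp) := List.filter_sublist
    have hsort : (AV.map Prod.snd).Pairwise (· ≤ ·) := by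
      have h1 : (AV.map Prod.snd).Sublist sp := by
        have := hsub.map Prod.snd
        rwa [map_snd_enumFrom] at this
      have h2 : sp.Pairwise (· ≤ ·) := PySem.List.sorted_pairwise pred_bins (fun x => x)
      exact h2.sublist h1
    have hpfst : AV.Pairwise (fun a b => a.1 < b.1) :=
      (pairwise_fst_enumFrom 0 sp).sublist hsub
    obtain ⟨hiff, hexx⟩ := step_core t delta AV hsort
    have hA : aOuter pred_bins delta (t :: ts) used hits =
        (if aInner t delta used sp 0 (-1) (delta+1) ≥ 0
         then aOuter pred_bins delta ts
            (used.set (aInner t delta used sp 0 (-1) (delta+1)).toNat true) (hits+1)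
         else aOuter pred_bins delta ts used hits) := rfl
    rw [hA, bOuter_cons, aInner_eq_midScanP t delta used sp, ← hAV]
    by_cases hge : midScanP t delta AV (-1) (delta+1) ≥ 0
    · have hbge : bPick t delta (AV.map Prod.snd) ≥ 0 := hiff.mp hge
      obtain ⟨k, hk, hrk, her⟩ := hexx hge
      rw [if_pos hge, if_pos hbge]
      have hjmem : (AV[k]'hk) ∈ enumFrom 0 sp := hsub.subset (List.getElem_mem hk)
      have hjlt : (AV[k]'hk).1 < used.length := by
        have h1 := fst_mem_enumFrom_lt 0 sp _ hjmem
        have h2 : (enumFrom 0 sp).length = sp.length := length_enumFrom 0 sp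
        omega
      have hrt : (midScanP t delta AV (-1) (delta+1)).toNat = (AV[k]'hk).1 := by
        rw [hrk]; simp
      rw [hrt]
      rw [ih (used.set (AV[k]'hk).1 true) (hits+1) (by simpa using hlen)]
      rw [mask_step sp used _ hjlt, ← hAV, filter_ne_eq_eraseIdx AV k hk hpfst,
        map_eraseIdx' Prod.snd AV k, ← her]
    · rw [if_neg hge, if_neg (fun h => hge (hiff.mpr h))]
      exact ih used hits hlen

-- ===== VERDICT (by name: the statement is the Claim_ definition above) =====
theorem hits_with_tol_unique_spec : Claim_equal_hits_with_tol_unique := by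
  intro pred_bins true_bins delta _
  unfold Spec_hits_with_tol_unique hits_with_tol_unique hits_with_tol_unique_alt
  have h := main_loop pred_bins delta (PySem.List.sorted true_bins (fun x => x))
    (List.replicate pred_bins.length false) 0
    (by simp [PySem.List.length_sorted])
  rw [h]
  congr 1
  have hfe : (enumFrom 0 (PySem.List.sorted pred_bins (fun x => x))).filter
      (fun x => !((List.replicate pred_bins.length false).getD x.1 false))
      = enumFrom 0 (PySem.List.sorted pred_bins (fun x => x)) := by
    apply List.filter_eq_self.mpr
    intro x _
    simp
  rw [hfe, map_snd_enumFrom]
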